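-- pv_equiv track=rewrite | github.com/whattSUPkim/python-data-structure-and-algorithm | Practice/Programmers/Lv2-배열자르기.py | solution
-- ===== SOURCE A (Python) =====
-- def solution(n, left, right):
--     arr = []
--     start = left // n + 1
--     end = right // n + 1
--     for i in range(start, end + 1):
--         tmp1 = [i] * (i - 1)
--         tmp2 = [j for j in range(i, n + 1)]
--         arr.extend(tmp1)
--         arr.extend(tmp2)
--
--     result_left = left % n
--     result_right = n - (right % n + 1)
--     if result_right == 0:
--         return arr[result_left:]
--     else:
--         return arr[result_left:-result_right]
-- ===== SOURCE B (Python) =====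
-- def solution(n, left, right):
--     return [max(k // n, k % n) + 1 for k in range(left, right + 1)]
-- ===== Notes on version B (the rewrite author's own statement) =====
-- stated objective: alternative
-- what changed: Instead of materialising whole matrix rows (left//n+1 .. right//n+1) with a loop, two temporary lists per row and a final slice, B computes each requested entry directly by the closed form max(k//n, k%n)+1 for k in [left, right]; same asymptotic cost, no speed claim.
-- outside the precondition, e.g. on solution(3, -1, 2): A returns [2, 3, 1, 2, 3], B returns [3, 1, 2, 3]; on solution(-2, 0, 1): A returns [], B returns [1, 0]
import Mathlib
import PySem

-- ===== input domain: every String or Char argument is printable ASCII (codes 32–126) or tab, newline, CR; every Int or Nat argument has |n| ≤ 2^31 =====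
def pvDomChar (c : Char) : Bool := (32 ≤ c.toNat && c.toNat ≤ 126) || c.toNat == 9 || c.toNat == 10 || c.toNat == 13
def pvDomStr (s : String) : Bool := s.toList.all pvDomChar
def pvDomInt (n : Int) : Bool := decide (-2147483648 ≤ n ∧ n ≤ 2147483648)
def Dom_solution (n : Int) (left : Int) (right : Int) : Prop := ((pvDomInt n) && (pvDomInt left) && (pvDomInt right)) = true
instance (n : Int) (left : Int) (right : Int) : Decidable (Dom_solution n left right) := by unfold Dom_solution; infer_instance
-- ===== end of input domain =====

-- B replaces A's row-building-and-slicing with the per-index closed form max(k//n, k%n)+1 (alternative: per-entry arithmetic instead of row materialisation and slicing).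

-- ===== PORT A =====
def solution (n : Int) (left : Int) (right : Int) : List Int :=
  let start := PySem.Int.floordiv left n + 1
  let stop := PySem.Int.floordiv right n + 1
  let arr := (PySem.List.pyRange start (stop + 1) 1).foldl
    (fun acc i => acc ++ PySem.List.pyRepeat [i] (i - 1) ++ PySem.List.pyRange i (n + 1) 1) []
  let resultLeft := PySem.Int.mod left n
  let resultRight := n - (PySem.Int.mod right n + 1)
  if resultRight = 0 then PySem.List.slice arr (some resultLeft) none
  else PySem.List.slice arr (some resultLeft) (some (-resultRight))

-- ===== PORT B =====
def solution_alt (n : Int) (left : Int) (right : Int) : List Int :=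
  (PySem.List.pyRange left (right + 1) 1).map
    (fun k => max (PySem.Int.floordiv k n) (PySem.Int.mod k n) + 1)

-- ===== PRECONDITION & SPEC =====
-- Pre_ keeps the problem's natural domain (1 ≤ n and the window [left, right] inside or just below the n×n
-- matrix, right < n²+n) plus the windows whose built row range is empty and both sides return [] (right//n <
-- left//n for positive n; the corresponding band n < right < left ≤ n²+n for negative n); it excludes n = 0,
-- where A raises ZeroDivisionError, and the remaining out-of-matrix inputs (n < 0, left < 0 or right ≥ n²+n
-- with a non-empty row range), where A's value is an accident of over-/under-running its row construction and
-- slice arithmetic (see claim cites).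
def Pre_solution (n : Int) (left : Int) (right : Int) : Prop :=
  (1 ≤ n ∧ ((0 ≤ left ∧ right < n * n + n) ∨ PySem.Int.floordiv right n < PySem.Int.floordiv left n))
  ∨ (n ≤ -1 ∧ n < right ∧ right < left ∧ left ≤ n * n + n)
instance (n : Int) (left : Int) (right : Int) : Decidable (Pre_solution n left right) := by
  unfold Pre_solution; infer_instance
def pvWitness_solution : Int × Int × Int := (3, 2, 5)

def Spec_solution (n : Int) (left : Int) (right : Int) (out : List Int) : Prop := out = solution_alt n left right
instance (n : Int) (left : Int) (right : Int) (out : List Int) : Decidable (Spec_solution n left right out) := by unfold Spec_solution; infer_instance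

-- ===== CLAIM (what is proved, stated in full; the proofs are below) =====
def Claim_equal_solution : Prop := ∀ (n : Int) (left : Int) (right : Int), Dom_solution n left right → Pre_solution n left right → Spec_solution n left right (solution n left right)

-- ===== LEMMAS AND PROOFS =====

-- value of the flattened max-fill matrix at global index q*n + r (0 ≤ r < n)
lemma pv_floordiv_mod_decompose (n q r : Int) (hn : 0 < n) (hr0 : 0 ≤ r) (hrn : r < n) :
    PySem.Int.floordiv (q * n + r) n = q ∧ PySem.Int.mod (q * n + r) n = r := by
  have hq : PySem.Int.floordiv (q * n + r) n = q := by
    rw [PySem.Int.floordiv_eq_iff_of_pos hn]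
    constructor <;> nlinarith
  refine ⟨hq, ?_⟩
  have := PySem.Int.floordiv_mul_add_mod (q * n + r) n
  rw [hq] at this; omega

lemma pv_pyRange_drop (a b : Int) (k : Nat) :
    (PySem.List.pyRange a b 1).drop k = PySem.List.pyRange (a + k) b 1 := by
  apply List.ext_getElem
  · simp [List.length_drop, PySem.List.length_pyRange_one]; omega
  · intro i h1 h2
    rw [List.getElem_drop]
    rw [PySem.List.getElem_pyRange_one, PySem.List.getElem_pyRange_one]
    push_cast; ring

lemma pv_pyRange_take (a b : Int) (k : Nat) :
    (PySem.List.pyRange a b 1).take k = PySem.List.pyRange a (min (a + k) b) 1 := by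
  apply List.ext_getElem
  · simp [List.length_take, PySem.List.length_pyRange_one]; omega
  · intro i h1 h2
    rw [List.getElem_take]
    rw [PySem.List.getElem_pyRange_one, PySem.List.getElem_pyRange_one]

lemma pv_clampIdx_nonneg (L : Nat) (x : Int) (h0 : 0 ≤ x) (h : x ≤ (L : Int)) :
    PySem.List.clampIdx L x = x.toNat := by
  unfold PySem.List.clampIdx; split_ifs <;> omega

lemma pv_clampIdx_neg (L : Nat) (x : Int) (h0 : 0 < x) (h : x ≤ (L : Int)) :
    PySem.List.clampIdx L (-x) = ((L : Int) - x).toNat := by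
  unfold PySem.List.clampIdx; split_ifs <;> omega

lemma pv_pyRange_empty (a b : Int) (h : b ≤ a) : PySem.List.pyRange a b 1 = [] := by
  apply List.eq_nil_of_length_eq_zero
  rw [PySem.List.length_pyRange_one]; omega

-- one matrix row: A's construction equals the closed form along indices [(i-1)*n, i*n)
lemma pv_row_eq (n i : Int) (hn : 0 < n) (h1 : 1 ≤ i) (h2 : i ≤ n + 1) :
    PySem.List.pyRepeat [i] (i - 1) ++ PySem.List.pyRange i (n + 1) 1 =
      (PySem.List.pyRange ((i - 1) * n) (i * n) 1).map
        (fun k => max (PySem.Int.floordiv k n) (PySem.Int.mod k n) + 1) := by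
  apply List.ext_getElem
  · have hrng : i * n - (i - 1) * n = n := by ring
    simp [PySem.List.pyRepeat_singleton, PySem.List.length_pyRange_one]
    omega
  · intro j h1' h2'
    have hlen : (PySem.List.pyRepeat [i] (i - 1)).length = (i - 1).toNat := by
      simp [PySem.List.pyRepeat_singleton]
    have hj : (j : Int) < i * n - (i - 1) * n := by
      have := h2'
      rw [List.length_map, PySem.List.length_pyRange_one] at this
      omega
    rw [List.getElem_map, PySem.List.getElem_pyRange_one]
    have hdec := pv_floordiv_mod_decompose n (i - 1) (j : Int) hn (by positivity) (by nlinarith [hj])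
    by_cases hcase : j < (i - 1).toNat
    · -- inside the replicate part: value i
      rw [List.getElem_append_left (by omega)]
      have : (PySem.List.pyRepeat [i] (i - 1))[j]'(by omega) = i := by
        simp [PySem.List.pyRepeat_singleton]
      rw [this]
      have h' : (i - 1) * n + (j : Int) = (i - 1) * n + (j : Int) := rfl
      rw [hdec.1, hdec.2]
      have : (j : Int) < i - 1 := by omega
      omega
    · -- inside the range part: value (position + 1)
      rw [List.getElem_append_right (by omega)]
      rw [PySem.List.getElem_pyRange_one]
      rw [hdec.1, hdec.2]
      have : (i - 1 : Int) ≤ (j : Int) := by omega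
      have hcast : ((j - (PySem.List.pyRepeat [i] (i - 1)).length : Nat) : Int) = (j : Int) - (i - 1) := by
        omega
      rw [hcast]
      omega

-- concatenating consecutive rows a .. a+m-1 gives the closed form along [(a-1)*n, (a+m-1)*n)
lemma pv_flat_rows (n : Int) (hn : 0 < n) (m : Nat) : ∀ (a : Int), 1 ≤ a → a + m - 1 ≤ n + 1 →
    (PySem.List.pyRange a (a + m) 1).flatMap
        (fun i => PySem.List.pyRepeat [i] (i - 1) ++ PySem.List.pyRange i (n + 1) 1) =
      (PySem.List.pyRange ((a - 1) * n) ((a + m - 1) * n) 1).map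
        (fun k => max (PySem.Int.floordiv k n) (PySem.Int.mod k n) + 1) := by
  induction m with
  | zero =>
    intro a _ _
    simp only [Nat.cast_zero, add_zero]
    rw [pv_pyRange_empty a a (by omega), pv_pyRange_empty _ _ (by omega)]
    simp
  | succ m ih =>
    intro a ha han
    rw [PySem.List.pyRange_one_cons (by push_cast; omega)]
    rw [List.flatMap_cons]
    have hrow := pv_row_eq n a hn ha (by push_cast at han ⊢; omega)
    rw [hrow]
    have hrest := ih (a + 1) (by omega) (by push_cast at han ⊢; omega)
    have : a + 1 + (m : Int) = a + ((m : Nat) + 1 : Nat) := by push_cast; ring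
    rw [this] at hrest
    rw [show (a + 1 - 1 : Int) = a by ring] at hrest
    rw [hrest]
    rw [← List.map_append]
    congr 1
    have hsplit := PySem.List.pyRange_one_append ((a - 1) * n) (a * n) ((a + ((m : Nat) + 1 : Nat) - 1) * n)
      (by nlinarith) (by push_cast; nlinarith)
    rw [← hsplit]

lemma pv_pos_case (n left right : Int) (hn : 1 ≤ n)
    (hd : (0 ≤ left ∧ right < n * n + n) ∨ PySem.Int.floordiv right n < PySem.Int.floordiv left n) :
    solution n left right = solution_alt n left right := by
  unfold solution solution_alt
  simp only []
  set ql := PySem.Int.floordiv left n with hql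
  set ml := PySem.Int.mod left n with hml
  set qr := PySem.Int.floordiv right n with hqr
  set mr := PySem.Int.mod right n with hmr
  have hn' : (0 : Int) < n := by omega
  have hml0 : 0 ≤ ml := PySem.Int.mod_nonneg left hn'
  have hmln : ml < n := PySem.Int.mod_lt left hn'
  have hmr0 : 0 ≤ mr := PySem.Int.mod_nonneg right hn'
  have hmrn : mr < n := PySem.Int.mod_lt right hn'
  have hleft : ql * n + ml = left := by
    have := PySem.Int.floordiv_mul_add_mod left n; omega
  have hright : qr * n + mr = right := by
    have := PySem.Int.floordiv_mul_add_mod right n; omega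
  have hdist : (qr + 1) * n = qr * n + n := by ring
  -- the loop is a flatMap of rows
  have harr : (PySem.List.pyRange (ql + 1) (qr + 1 + 1) 1).foldl
      (fun acc i => acc ++ PySem.List.pyRepeat [i] (i - 1) ++ PySem.List.pyRange i (n + 1) 1) [] =
      (PySem.List.pyRange (ql + 1) (qr + 1 + 1) 1).flatMap
      (fun i => PySem.List.pyRepeat [i] (i - 1) ++ PySem.List.pyRange i (n + 1) 1) := by
    rw [PySem.List.foldl_congr_mem _ _
      (fun acc i => acc ++ (PySem.List.pyRepeat [i] (i - 1) ++ PySem.List.pyRange i (n + 1) 1)) _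
      (by intro acc x _; rw [List.append_assoc])]
    rw [PySem.List.foldl_append_eq_flatMap, List.nil_append]
  rw [harr]
  by_cases hcase : ql ≤ qr
  · -- at least one row is built; the slice selects exactly indices left..right
    have hlr : 0 ≤ left ∧ right < n * n + n := by
      rcases hd with h | h
      · exact h
      · omega
    obtain ⟨hl, hr⟩ := hlr
    have hql0 : 0 ≤ ql := by nlinarith
    have hqrn : qr ≤ n := by nlinarith
    have hflat := pv_flat_rows n hn' (qr + 1 - ql).toNat (ql + 1) (by omega) (by omega)
    have h1 : (ql + 1 : Int) + ((qr + 1 - ql).toNat : Int) = qr + 1 + 1 := by omega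
    rw [h1] at hflat
    have h2 : (ql + 1 - 1 : Int) = ql := by ring
    have h3 : ((qr + 1 + 1 - 1) * n : Int) = (qr + 1) * n := by ring
    rw [h2, h3] at hflat
    rw [hflat]
    have hlen : ((PySem.List.pyRange (ql * n) ((qr + 1) * n) 1).map
        (fun k => max (PySem.Int.floordiv k n) (PySem.Int.mod k n) + 1)).length
        = ((qr + 1) * n - ql * n).toNat := by
      rw [List.length_map, PySem.List.length_pyRange_one]
    have hlen' : (n : Int) ≤ (qr + 1) * n - ql * n := by nlinarith
    by_cases hrr : n - (mr + 1) = 0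
    · rw [if_pos hrr]
      rw [PySem.List.slice_from _ hml0]
      rw [← List.map_drop, pv_pyRange_drop]
      have : ql * n + (ml.toNat : Int) = left := by omega
      rw [this]
      congr 2
      omega
    · rw [if_neg hrr]
      have hrrpos : 0 < n - (mr + 1) := by omega
      -- unfold the slice: both bounds are in range
      show (List.take _ (List.drop _ _)) = _
      simp only [List.length_map, PySem.List.length_pyRange_one]
      rw [pv_clampIdx_nonneg _ _ hml0 (by omega)]
      rw [pv_clampIdx_neg _ _ hrrpos (by omega)]
      rw [← List.map_drop, pv_pyRange_drop, ← List.map_take, pv_pyRange_take]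
      have hstart : ql * n + (ml.toNat : Int) = left := by omega
      rw [hstart]
      have e1 : ((((qr + 1) * n - ql * n).toNat : Int)) = (qr + 1) * n - ql * n :=
        Int.toNat_of_nonneg (by omega)
      rw [e1]
      by_cases hord : left ≤ right + 1
      · have hX : min (left + (((((qr + 1) * n - ql * n - (n - (mr + 1))).toNat) - ml.toNat : Nat) : Int))
            ((qr + 1) * n) = right + 1 := by omega
        rw [hX]
      · rw [pv_pyRange_empty left _ (by omega), pv_pyRange_empty left (right + 1) (by omega)]
  · -- no rows: both sides are empty
    rw [pv_pyRange_empty _ _ (by omega)]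
    have hstep : (qr + 1) * n ≤ ql * n :=
      mul_le_mul_of_nonneg_right (by omega) (by omega)
    rw [pv_pyRange_empty left (right + 1) (by nlinarith)]
    simp [PySem.List.slice]

lemma pv_neg_case (n left right : Int) (hn : n ≤ -1) (h1 : n < right) (h2 : right < left)
    (h3 : left ≤ n * n + n) : solution n left right = solution_alt n left right := by
  unfold solution solution_alt
  simp only []
  have hn' : n < 0 := by omega
  have hmodl := PySem.Int.mod_neg_bounds left hn'
  have hmodr := PySem.Int.mod_neg_bounds right hn'
  have hleft := PySem.Int.floordiv_mul_add_mod left n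
  have hright := PySem.Int.floordiv_mul_add_mod right n
  -- every visited row index i satisfies i ≤ 1 (no replicate part) and n + 1 ≤ i (no range part)
  have hqr0 : PySem.Int.floordiv right n ≤ 0 := by nlinarith
  have hql1 : n + 1 ≤ PySem.Int.floordiv left n := by nlinarith
  have harr : (PySem.List.pyRange (PySem.Int.floordiv left n + 1) (PySem.Int.floordiv right n + 1 + 1) 1).foldl
      (fun acc i => acc ++ PySem.List.pyRepeat [i] (i - 1) ++ PySem.List.pyRange i (n + 1) 1) [] = ([] : List Int) := by
    rw [PySem.List.foldl_congr_mem _ _ (fun acc _ => acc) _ ?_]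
    · rw [PySem.List.foldl_ignore]
    · intro acc i hi
      rw [PySem.List.mem_pyRange_one] at hi
      rw [PySem.List.pyRepeat_singleton, pv_pyRange_empty i (n + 1) (by omega)]
      have : (i - 1).toNat = 0 := by omega
      rw [this]
      simp
  rw [harr, pv_pyRange_empty left (right + 1) (by omega)]
  simp [PySem.List.slice]

theorem solution_spec : Claim_equal_solution := by
  intro n left right _ hpre
  unfold Spec_solution
  rcases hpre with ⟨hn, hd⟩ | ⟨hn, h1, h2, h3⟩
  · exact pv_pos_case n left right hn hd
  · exact pv_neg_case n left right hn h1 h2 h3
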